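-- pv_equiv track=rewrite | github.com/sandeepchaitales/rightnamev2.1.1 | backend/linguistic_analysis.py | get_category_key
-- ===== SOURCE A (Python) =====
-- def get_category_key(category: str) -> str:
--     """Map category to brand examples key"""
--     category_lower = category.lower()
--     if any(word in category_lower for word in ["tea", "chai"]):
--         return "tea"
--     elif any(word in category_lower for word in ["coffee", "cafe", "espresso"]):
--         return "coffee"
--     elif any(word in category_lower for word in ["hotel", "hospitality", "resort", "lodge"]):
--         return "hotel"
--     elif any(word in category_lower for word in ["tech", "software", "saas", "app", "digital"]):
--         return "technology"
--     elif any(word in category_lower for word in ["food", "restaurant", "snack", "sweet"]):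
--         return "food"
--     elif any(word in category_lower for word in ["beauty", "cosmetic", "skincare", "makeup"]):
--         return "beauty"
--     elif any(word in category_lower for word in ["finance", "payment", "bank", "fintech"]):
--         return "finance"
--     return "default"
-- ===== SOURCE B (Python) =====
-- _KEYWORD_PRIORITY = {
--     "tea": 0, "chai": 0,
--     "coffee": 1, "cafe": 1, "espresso": 1,
--     "hotel": 2, "hospitality": 2, "resort": 2, "lodge": 2,
--     "tech": 3, "software": 3, "saas": 3, "app": 3, "digital": 3,
--     "food": 4, "restaurant": 4, "snack": 4, "sweet": 4,
--     "beauty": 5, "cosmetic": 5, "skincare": 5, "makeup": 5,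
--     "finance": 6, "payment": 6, "bank": 6, "fintech": 6,
-- }
-- _KEYS = ["tea", "coffee", "hotel", "technology", "food", "beauty", "finance", "default"]
--
--
-- def get_category_key(category: str) -> str:
--     """Map category to brand examples key"""
--     s = category.lower()
--     best = 7
--     for i in range(len(s)):
--         for kw, pri in _KEYWORD_PRIORITY.items():
--             if pri < best and s.startswith(kw, i):
--                 best = pri
--     return _KEYS[best]
-- ===== Notes on version B (the rewrite author's own statement) =====
-- stated objective: alternative
-- what changed: Instead of A's ordered if/elif ladder of per-group substring tests, B sweeps the lowered string once position by position, prefix-matching each position against a flat keyword-to-priority map and keeping the minimum matched priority, then indexes a key table by that minimum.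
import Mathlib
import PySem

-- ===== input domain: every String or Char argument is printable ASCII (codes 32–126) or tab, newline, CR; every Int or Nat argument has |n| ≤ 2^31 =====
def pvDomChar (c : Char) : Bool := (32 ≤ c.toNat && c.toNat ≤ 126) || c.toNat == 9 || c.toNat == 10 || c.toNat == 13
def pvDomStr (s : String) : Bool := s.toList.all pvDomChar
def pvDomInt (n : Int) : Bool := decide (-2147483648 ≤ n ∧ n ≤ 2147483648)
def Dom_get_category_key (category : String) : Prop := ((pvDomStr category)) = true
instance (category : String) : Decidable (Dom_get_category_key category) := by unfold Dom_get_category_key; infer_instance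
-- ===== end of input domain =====

-- B replaces A's if/elif ladder of substring tests by one left-to-right sweep of the
-- lowered string, prefix-matching each position against a keyword→priority map and
-- keeping the minimum matched priority (alternative algorithm; same behaviour).

-- ===== PORT A =====
def get_category_key (category : String) : String :=
  let category_lower := PySem.Str.lower category
  if (["tea", "chai"].any fun word => PySem.Str.isIn word category_lower) then "tea"
  else if (["coffee", "cafe", "espresso"].any fun word => PySem.Str.isIn word category_lower) then "coffee"
  else if (["hotel", "hospitality", "resort", "lodge"].any fun word => PySem.Str.isIn word category_lower) then "hotel"
  else if (["tech", "software", "saas", "app", "digital"].any fun word => PySem.Str.isIn word category_lower) then "technology"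
  else if (["food", "restaurant", "snack", "sweet"].any fun word => PySem.Str.isIn word category_lower) then "food"
  else if (["beauty", "cosmetic", "skincare", "makeup"].any fun word => PySem.Str.isIn word category_lower) then "beauty"
  else if (["finance", "payment", "bank", "fintech"].any fun word => PySem.Str.isIn word category_lower) then "finance"
  else "default"

-- ===== PORT B =====
-- the dict _KEYWORD_PRIORITY (string keys, distinct) as an association list in insertion order
def kwPriority : List (String × Nat) :=
  [("tea", 0), ("chai", 0),
   ("coffee", 1), ("cafe", 1), ("espresso", 1),
   ("hotel", 2), ("hospitality", 2), ("resort", 2), ("lodge", 2),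
   ("tech", 3), ("software", 3), ("saas", 3), ("app", 3), ("digital", 3),
   ("food", 4), ("restaurant", 4), ("snack", 4), ("sweet", 4),
   ("beauty", 5), ("cosmetic", 5), ("skincare", 5), ("makeup", 5),
   ("finance", 6), ("payment", 6), ("bank", 6), ("fintech", 6)]

def keyNames : List String :=
  ["tea", "coffee", "hotel", "technology", "food", "beauty", "finance", "default"]

-- s.startswith(kw, i) with 0 ≤ i: exact via the slice s[i:] (List.drop) and PySem.Chars.startswith
def get_category_key_alt (category : String) : String :=
  let s := (PySem.Str.lower category).toList
  let best := (List.range s.length).foldl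
    (fun best i => kwPriority.foldl
      (fun best kv =>
        if kv.2 < best ∧ PySem.Chars.startswith (s.drop i) kv.1.toList = true then kv.2 else best)
      best) 7
  keyNames.getD best "default"

-- ===== PRECONDITION & SPEC =====
def Spec_get_category_key (category : String) (out : String) : Prop := out = get_category_key_alt category
instance (category : String) (out : String) : Decidable (Spec_get_category_key category out) := by unfold Spec_get_category_key; infer_instance

-- ===== CLAIM (what is proved, stated in full; the proofs are below) =====
def Claim_equal_get_category_key : Prop := ∀ (category : String), Dom_get_category_key category → Spec_get_category_key category (get_category_key category)

-- ===== LEMMAS AND PROOFS =====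

-- guard 'f x < b ∧ q x' updates to f x exactly like taking the min when q x holds
theorem pvFoldGuardEq {α : Type} (l : List α) (q : α → Prop) [DecidablePred q]
    (f : α → Nat) (b : Nat) :
    l.foldl (fun b x => if f x < b ∧ q x then f x else b) b
      = l.foldl (fun b x => if q x then min b (f x) else b) b := by
  induction l generalizing b with
  | nil => rfl
  | cons x t ih =>
      simp only [List.foldl_cons]
      by_cases hq : q x
      · by_cases hlt : f x < b
        · simp [hq, hlt, Nat.min_eq_right (Nat.le_of_lt hlt), ih]
        · simp [hq, hlt, Nat.min_eq_left (Nat.le_of_not_lt hlt), ih]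
      · simp [hq, ih]

-- the min-fold never exceeds its initial accumulator
theorem pvFoldMinLeInit {α : Type} (l : List α) (q : α → Prop) [DecidablePred q]
    (f : α → Nat) (b : Nat) :
    l.foldl (fun b x => if q x then min b (f x) else b) b ≤ b := by
  induction l generalizing b with
  | nil => simp
  | cons x t ih =>
      simp only [List.foldl_cons]
      by_cases hq : q x
      · simp only [hq, if_pos]
        exact le_trans (ih _) (Nat.min_le_left _ _)
      · simpa [hq] using ih b

-- the min-fold is bounded by every selected element's value
theorem pvFoldMinLeMem {α : Type} (l : List α) (q : α → Prop) [DecidablePred q]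
    (f : α → Nat) (b : Nat) (x : α) (hx : x ∈ l) (hq : q x) :
    l.foldl (fun b x => if q x then min b (f x) else b) b ≤ f x := by
  induction l generalizing b with
  | nil => cases hx
  | cons y t ih =>
      simp only [List.foldl_cons]
      rcases List.mem_cons.mp hx with h | h
      · subst h
        simp only [hq, if_pos]
        exact le_trans (pvFoldMinLeInit t q f _) (Nat.min_le_right _ _)
      · by_cases hqy : q y
        · simpa [hqy] using ih _ h
        · simpa [hqy] using ih _ h
  
-- the min-fold's result is the initial accumulator or some selected element's value
theorem pvFoldMinAttained {α : Type} (l : List α) (q : α → Prop) [DecidablePred q]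
    (f : α → Nat) (b : Nat) :
    l.foldl (fun b x => if q x then min b (f x) else b) b = b ∨
      ∃ x ∈ l, q x ∧ l.foldl (fun b x => if q x then min b (f x) else b) b = f x := by
  induction l generalizing b with
  | nil => exact Or.inl rfl
  | cons y t ih =>
      simp only [List.foldl_cons]
      by_cases hqy : q y
      · simp only [hqy, if_pos]
        rcases ih (min b (f y)) with h | ⟨x, hx, hq, h⟩
        · rcases Nat.le_total b (f y) with hle | hle
          · exact Or.inl (h.trans (Nat.min_eq_left hle))
          · exact Or.inr ⟨y, List.mem_cons_self, hqy, h.trans (Nat.min_eq_right hle)⟩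
        · exact Or.inr ⟨x, List.mem_cons_of_mem _ hx, hq, h⟩
      · simp only [hqy, if_neg, not_false_iff]
        rcases ih b with h | ⟨x, hx, hq, h⟩
        · exact Or.inl h
        · exact Or.inr ⟨x, List.mem_cons_of_mem _ hx, hq, h⟩

-- a nonempty keyword occurs somewhere in s iff it is a prefix of some suffix s[i:], i < |s|
theorem pvExistsStartIffIsIn (s kw : List Char) (hkw : kw ≠ []) :
    (∃ i, i < s.length ∧ PySem.Chars.startswith (s.drop i) kw = true) ↔
      PySem.Chars.isIn kw s = true := by
  rw [← PySem.Chars.exists_prefix_drop_iff_isIn]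
  constructor
  · rintro ⟨i, _, hp⟩
    exact ⟨i, (PySem.Chars.startswith_iff _ _).mp hp⟩
  · rintro ⟨j, hp⟩
    refine ⟨j, ?_, (PySem.Chars.startswith_iff _ _).mpr hp⟩
    by_contra h
    have : s.drop j = [] := List.drop_eq_nil_of_le (Nat.le_of_not_lt h)
    rw [this] at hp
    exact hkw (List.prefix_nil.mp hp)

-- occurrence of a priority class in the lowered string: some table keyword of that priority occurs
def pvOcc (ls : String) (j : Nat) : Prop :=
  ∃ kv ∈ kwPriority, kv.2 = j ∧ PySem.Str.isIn kv.1 ls = true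

-- B's sweep accumulator, named for the proofs (definitionally the fold inside get_category_key_alt)
def pvBest (s : List Char) : Nat :=
  (List.range s.length).foldl
    (fun best i => kwPriority.foldl
      (fun best kv =>
        if kv.2 < best ∧ PySem.Chars.startswith (s.drop i) kv.1.toList = true then kv.2 else best)
      best) 7

-- all (position, table-entry) pairs the double loop visits, flattened
def pvPairs (s : List Char) : List (Nat × (String × Nat)) :=
  ((List.range s.length).map (fun i => kwPriority.map (fun kv => (i, kv)))).flatten

theorem pvMem_pvPairs (s : List Char) (p : Nat × (String × Nat)) :
    p ∈ pvPairs s ↔ p.1 < s.length ∧ p.2 ∈ kwPriority := by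
  simp only [pvPairs, List.mem_flatten, List.mem_map, List.mem_range]
  constructor
  · rintro ⟨t, ⟨i, hi, rfl⟩, hp⟩
    obtain ⟨kv, hkv, rfl⟩ := List.mem_map.mp hp
    exact ⟨hi, hkv⟩
  · rintro ⟨h1, h2⟩
    exact ⟨kwPriority.map (fun kv => (p.1, kv)), ⟨p.1, h1, rfl⟩,
      List.mem_map.mpr ⟨p.2, h2, rfl⟩⟩

theorem pvBest_eq_flat (s : List Char) :
    pvBest s = (pvPairs s).foldl
      (fun b p => if PySem.Chars.startswith (s.drop p.1) p.2.1.toList = true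
                  then min b p.2.2 else b) 7 := by
  unfold pvBest pvPairs
  rw [List.foldl_flatten]
  simp only [List.foldl_map]
  have hfun : (fun (best : Nat) (i : Nat) => kwPriority.foldl
        (fun best kv =>
          if kv.2 < best ∧ PySem.Chars.startswith (s.drop i) kv.1.toList = true then kv.2 else best)
        best)
      = fun best i => kwPriority.foldl
        (fun b kv =>
          if PySem.Chars.startswith (s.drop i) kv.1.toList = true then min b kv.2 else b)
        best := by
    funext best i
    exact pvFoldGuardEq kwPriority _ (fun kv => kv.2) best
  rw [hfun]

theorem pvKw_ne_nil : ∀ kv ∈ kwPriority, kv.1.toList ≠ [] := by decide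

theorem pvKw_lt7 : ∀ kv ∈ kwPriority, kv.2 < 7 := by decide

theorem pvOcc_lt7 (ls : String) (j : Nat) : pvOcc ls j → j < 7 := by
  rintro ⟨kv, hkv, rfl, -⟩
  exact pvKw_lt7 kv hkv

theorem pvBestSpec (ls : String) :
    (∀ j, pvOcc ls j → pvBest ls.toList ≤ j) ∧
      (pvBest ls.toList = 7 ∨ pvOcc ls (pvBest ls.toList)) := by
  have hflat := pvBest_eq_flat ls.toList
  constructor
  · rintro j ⟨kv, hkv, rfl, hin⟩
    have hin' : PySem.Chars.isIn kv.1.toList ls.toList = true := by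
      simpa using hin
    obtain ⟨i, hi, hsw⟩ :=
      (pvExistsStartIffIsIn ls.toList kv.1.toList (pvKw_ne_nil kv hkv)).mpr hin'
    rw [hflat]
    exact pvFoldMinLeMem (pvPairs ls.toList) _ (fun p => p.2.2) 7 (i, kv)
      ((pvMem_pvPairs ls.toList (i, kv)).mpr ⟨hi, hkv⟩) hsw
  · rw [hflat]
    rcases pvFoldMinAttained (pvPairs ls.toList)
        (fun p => PySem.Chars.startswith (ls.toList.drop p.1) p.2.1.toList = true)
        (fun p => p.2.2) 7 with h | ⟨p, hp, hq, h⟩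
    · exact Or.inl h
    · right
      obtain ⟨hi, hkv⟩ := (pvMem_pvPairs ls.toList p).mp hp
      refine ⟨p.2, hkv, h.symm, ?_⟩
      have hin' : PySem.Chars.isIn p.2.1.toList ls.toList = true :=
        (pvExistsStartIffIsIn ls.toList p.2.1.toList (pvKw_ne_nil p.2 hkv)).mp ⟨p.1, hi, hq⟩
      simpa using hin'

theorem pvBest_eq_of (ls : String) (j : Nat) (hocc : pvOcc ls j)
    (hlow : ∀ j', j' < j → ¬ pvOcc ls j') : pvBest ls.toList = j := by
  obtain ⟨hub, hatt⟩ := pvBestSpec ls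
  have h1 := hub j hocc
  rcases hatt with h7 | hoccb
  · have := pvOcc_lt7 ls j hocc
    omega
  · by_contra hne
    exact hlow _ (by omega) hoccb

theorem pvBest_eq7 (ls : String) (h : ∀ j, ¬ pvOcc ls j) : pvBest ls.toList = 7 := by
  rcases (pvBestSpec ls).2 with h7 | hb
  · exact h7
  · exact absurd hb (h _)

-- each of A's group tests is exactly the occurrence of that priority class
theorem pvOcc0_iff (ls : String) :
    ((["tea", "chai"].any fun word => PySem.Str.isIn word ls) = true) ↔ pvOcc ls 0 := by
  simp [pvOcc, kwPriority]

theorem pvOcc1_iff (ls : String) :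
    ((["coffee", "cafe", "espresso"].any fun word => PySem.Str.isIn word ls) = true) ↔ pvOcc ls 1 := by
  simp [pvOcc, kwPriority]

theorem pvOcc2_iff (ls : String) :
    ((["hotel", "hospitality", "resort", "lodge"].any fun word => PySem.Str.isIn word ls) = true) ↔ pvOcc ls 2 := by
  simp [pvOcc, kwPriority]

theorem pvOcc3_iff (ls : String) :
    ((["tech", "software", "saas", "app", "digital"].any fun word => PySem.Str.isIn word ls) = true) ↔ pvOcc ls 3 := by
  simp [pvOcc, kwPriority]

theorem pvOcc4_iff (ls : String) :
    ((["food", "restaurant", "snack", "sweet"].any fun word => PySem.Str.isIn word ls) = true) ↔ pvOcc ls 4 := by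
  simp [pvOcc, kwPriority]

theorem pvOcc5_iff (ls : String) :
    ((["beauty", "cosmetic", "skincare", "makeup"].any fun word => PySem.Str.isIn word ls) = true) ↔ pvOcc ls 5 := by
  simp [pvOcc, kwPriority]

theorem pvOcc6_iff (ls : String) :
    ((["finance", "payment", "bank", "fintech"].any fun word => PySem.Str.isIn word ls) = true) ↔ pvOcc ls 6 := by
  simp [pvOcc, kwPriority]

-- A's ladder equals indexing the key table by the minimum occurring priority
theorem pvMain (ls : String) :
    (if (["tea", "chai"].any fun word => PySem.Str.isIn word ls) = true then "tea"
     else if (["coffee", "cafe", "espresso"].any fun word => PySem.Str.isIn word ls) = true then "coffee"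
     else if (["hotel", "hospitality", "resort", "lodge"].any fun word => PySem.Str.isIn word ls) = true then "hotel"
     else if (["tech", "software", "saas", "app", "digital"].any fun word => PySem.Str.isIn word ls) = true then "technology"
     else if (["food", "restaurant", "snack", "sweet"].any fun word => PySem.Str.isIn word ls) = true then "food"
     else if (["beauty", "cosmetic", "skincare", "makeup"].any fun word => PySem.Str.isIn word ls) = true then "beauty"
     else if (["finance", "payment", "bank", "fintech"].any fun word => PySem.Str.isIn word ls) = true then "finance"
     else "default") = keyNames.getD (pvBest ls.toList) "default" := by
  split_ifs with h0 h1 h2 h3 h4 h5 h6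
  · have hlow : ∀ j' < 0, ¬ pvOcc ls j' := by
      intro j' hj'
      omega
    rw [pvBest_eq_of ls 0 ((pvOcc0_iff ls).mp h0) hlow]
    rfl
  · have hlow : ∀ j' < 1, ¬ pvOcc ls j' := by
      intro j' hj'
      interval_cases j'
      · exact fun h => h0 ((pvOcc0_iff ls).mpr h)
    rw [pvBest_eq_of ls 1 ((pvOcc1_iff ls).mp h1) hlow]
    rfl
  · have hlow : ∀ j' < 2, ¬ pvOcc ls j' := by
      intro j' hj'
      interval_cases j'
      · exact fun h => h0 ((pvOcc0_iff ls).mpr h)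
      · exact fun h => h1 ((pvOcc1_iff ls).mpr h)
    rw [pvBest_eq_of ls 2 ((pvOcc2_iff ls).mp h2) hlow]
    rfl
  · have hlow : ∀ j' < 3, ¬ pvOcc ls j' := by
      intro j' hj'
      interval_cases j'
      · exact fun h => h0 ((pvOcc0_iff ls).mpr h)
      · exact fun h => h1 ((pvOcc1_iff ls).mpr h)
      · exact fun h => h2 ((pvOcc2_iff ls).mpr h)
    rw [pvBest_eq_of ls 3 ((pvOcc3_iff ls).mp h3) hlow]
    rfl
  · have hlow : ∀ j' < 4, ¬ pvOcc ls j' := by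
      intro j' hj'
      interval_cases j'
      · exact fun h => h0 ((pvOcc0_iff ls).mpr h)
      · exact fun h => h1 ((pvOcc1_iff ls).mpr h)
      · exact fun h => h2 ((pvOcc2_iff ls).mpr h)
      · exact fun h => h3 ((pvOcc3_iff ls).mpr h)
    rw [pvBest_eq_of ls 4 ((pvOcc4_iff ls).mp h4) hlow]
    rfl
  · have hlow : ∀ j' < 5, ¬ pvOcc ls j' := by
      intro j' hj'
      interval_cases j'
      · exact fun h => h0 ((pvOcc0_iff ls).mpr h)
      · exact fun h => h1 ((pvOcc1_iff ls).mpr h)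
      · exact fun h => h2 ((pvOcc2_iff ls).mpr h)
      · exact fun h => h3 ((pvOcc3_iff ls).mpr h)
      · exact fun h => h4 ((pvOcc4_iff ls).mpr h)
    rw [pvBest_eq_of ls 5 ((pvOcc5_iff ls).mp h5) hlow]
    rfl
  · have hlow : ∀ j' < 6, ¬ pvOcc ls j' := by
      intro j' hj'
      interval_cases j'
      · exact fun h => h0 ((pvOcc0_iff ls).mpr h)
      · exact fun h => h1 ((pvOcc1_iff ls).mpr h)
      · exact fun h => h2 ((pvOcc2_iff ls).mpr h)
      · exact fun h => h3 ((pvOcc3_iff ls).mpr h)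
      · exact fun h => h4 ((pvOcc4_iff ls).mpr h)
      · exact fun h => h5 ((pvOcc5_iff ls).mpr h)
    rw [pvBest_eq_of ls 6 ((pvOcc6_iff ls).mp h6) hlow]
    rfl
  · have hnone : ∀ j, ¬ pvOcc ls j := by
      intro j hocc
      have hj := pvOcc_lt7 ls j hocc
      interval_cases j
      · exact h0 ((pvOcc0_iff ls).mpr hocc)
      · exact h1 ((pvOcc1_iff ls).mpr hocc)
      · exact h2 ((pvOcc2_iff ls).mpr hocc)
      · exact h3 ((pvOcc3_iff ls).mpr hocc)
      · exact h4 ((pvOcc4_iff ls).mpr hocc)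
      · exact h5 ((pvOcc5_iff ls).mpr hocc)
      · exact h6 ((pvOcc6_iff ls).mpr hocc)
    rw [pvBest_eq7 ls hnone]
    rfl

-- ===== VERDICT (by name: the statement is the Claim_ definition above) =====
theorem get_category_key_spec : Claim_equal_get_category_key := by
  intro category _
  exact pvMain (PySem.Str.lower category)
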